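-- pv_equiv track=rewrite | github.com/Skill-Craft/relationship-graph | main.py | final_relation
-- ===== SOURCE A (Python) =====
-- def final_relation(final_actor, dic_dad):
--     aux = final_actor
--     final_list = []
--     while aux != dic_dad[aux]:
--         final_list.append(aux)
--         aux = dic_dad[aux]
--     final_list.append(aux)
--     final_list.reverse()
--     return final_list
-- ===== SOURCE B (Python) =====
-- def final_relation(final_actor, dic_dad):
--     # Two-pass: measure the chain depth, then fill a preallocated list
--     # back-to-front (no reverse, no growing append list).
--     depth = 1
--     aux = final_actor
--     while aux != dic_dad[aux]:
--         depth += 1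
--         aux = dic_dad[aux]
--     out = [None] * depth
--     aux = final_actor
--     for i in range(depth - 1, -1, -1):
--         out[i] = aux
--         aux = dic_dad[aux]
--     return out
-- ===== Notes on version B (the rewrite author's own statement) =====
-- stated objective: alternative
-- what changed: B walks the parent chain twice: one pass to count the depth, then fills a preallocated output list back-to-front, eliminating A's append-then-reverse accumulation.
import Mathlib
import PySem

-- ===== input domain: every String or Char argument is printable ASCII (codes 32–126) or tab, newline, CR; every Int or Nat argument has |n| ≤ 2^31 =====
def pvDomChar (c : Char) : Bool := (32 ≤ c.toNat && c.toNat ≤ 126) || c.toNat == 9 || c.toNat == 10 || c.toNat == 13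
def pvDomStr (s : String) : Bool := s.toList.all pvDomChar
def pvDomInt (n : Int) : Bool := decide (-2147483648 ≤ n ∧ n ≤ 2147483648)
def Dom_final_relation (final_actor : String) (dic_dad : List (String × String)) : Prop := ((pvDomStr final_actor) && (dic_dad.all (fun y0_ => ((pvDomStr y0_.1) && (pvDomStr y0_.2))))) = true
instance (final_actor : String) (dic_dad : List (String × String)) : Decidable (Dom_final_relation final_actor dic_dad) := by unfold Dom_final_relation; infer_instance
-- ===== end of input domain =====

-- B walks the parent chain twice — one pass to count the depth, then fills the output
-- back-to-front — instead of A's append-then-reverse accumulation (alternative decomposition).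


-- dict[aux]: first-match lookup in the association list (Python dict indexing; none = KeyError)
def frLookup (dic : List (String × String)) (k : String) : Option String :=
  match dic with
  | [] => none
  | (a, b) :: rest => if a == k then some b else frLookup rest k

-- ===== PORT A =====
-- A's while loop, fueled (the fuel only makes the loop total; Pre_ guarantees it suffices).
-- 'while aux != dic_dad[aux]: final_list.append(aux); aux = dic_dad[aux]'; then append aux and reverse.
def frA_loop : Nat → String → List (String × String) → List String → List String
  | 0, _, _, _ => []                                   -- fuel exhausted: only reachable outside Pre_
  | fuel + 1, aux, dic, acc =>
    match frLookup dic aux with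
    | none => []                                       -- KeyError: outside Pre_
    | some p => if aux == p then (acc ++ [aux]).reverse else frA_loop fuel p dic (acc ++ [aux])

def final_relation (final_actor : String) (dic_dad : List (String × String)) : List String :=
  frA_loop (dic_dad.length + 1) final_actor dic_dad []

-- ===== PORT B =====
-- pass 1: 'depth = 1; while aux != dic_dad[aux]: depth += 1; aux = dic_dad[aux]'
def frB_depth : Nat → String → List (String × String) → Nat → Nat
  | 0, _, _, d => d                                    -- fuel exhausted: only reachable outside Pre_
  | fuel + 1, aux, dic, d =>
    match frLookup dic aux with
    | none => d                                        -- KeyError: outside Pre_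
    | some p => if aux == p then d else frB_depth fuel p dic (d + 1)

-- pass 2: 'for i in range(depth-1, -1, -1): out[i] = aux; aux = dic_dad[aux]' —
-- writing indices depth-1 … 0 with successive aux values = prepending each aux in turn.
def frB_fill : Nat → String → List (String × String) → List String → List String
  | 0, _, _, out => out
  | i + 1, aux, dic, out =>
    match frLookup dic aux with
    | none => aux :: out                               -- KeyError mid-fill: outside Pre_
    | some p => frB_fill i p dic (aux :: out)

def final_relation_alt (final_actor : String) (dic_dad : List (String × String)) : List String :=
  frB_fill (frB_depth (dic_dad.length + 1) final_actor dic_dad 1) final_actor dic_dad []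

-- ===== PRECONDITION & SPEC =====
-- chainOk f a dic: following the parent map from a, every lookup succeeds and a self-parent
-- fixpoint is reached within f steps (a closed-form walk of the input map, not the ports' code).
def chainOk : Nat → String → List (String × String) → Bool
  | 0, a, dic =>
    match dic.lookup a with
    | none => false
    | some p => a == p
  | f + 1, a, dic =>
    match dic.lookup a with
    | none => false
    | some p => if a == p then true else chainOk f p dic

-- Pre_ excludes exactly the inputs on which A never returns: a missing key along the chain
-- (KeyError) or a chain that never reaches a self-parent (infinite loop). Any terminating chain
-- visits distinct keys of dic_dad, hence reaches its fixpoint within dic_dad.length steps.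
def Pre_final_relation (final_actor : String) (dic_dad : List (String × String)) : Prop :=
  chainOk dic_dad.length final_actor dic_dad = true

instance (final_actor : String) (dic_dad : List (String × String)) : Decidable (Pre_final_relation final_actor dic_dad) := by unfold Pre_final_relation; infer_instance

def pvWitness_final_relation : String × (List (String × String)) :=
  ("c", [("c", "b"), ("b", "a"), ("a", "a")])

def Spec_final_relation (final_actor : String) (dic_dad : List (String × String)) (out : List String) : Prop := out = final_relation_alt final_actor dic_dad
instance (final_actor : String) (dic_dad : List (String × String)) (out : List String) : Decidable (Spec_final_relation final_actor dic_dad out) := by unfold Spec_final_relation; infer_instance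

-- ===== CLAIM (what is proved, stated in full; the proofs are below) =====
def Claim_equal_final_relation : Prop := ∀ (final_actor : String) (dic_dad : List (String × String)), Dom_final_relation final_actor dic_dad → Pre_final_relation final_actor dic_dad → Spec_final_relation final_actor dic_dad (final_relation final_actor dic_dad)

-- ===== LEMMAS AND PROOFS =====

-- dict indexing (first match) agrees with the stdlib association-list lookup
theorem lookup_eq_frLookup (dic : List (String × String)) (k : String) :
    dic.lookup k = frLookup dic k := by
  induction dic with
  | nil => rfl
  | cons hd tl ih =>
    obtain ⟨a, b⟩ := hd
    have hc : (k == a) = (a == k) := by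
      cases h : a == k <;> cases h2 : k == a <;> simp_all <;> simp_all [eq_comm]
    simp only [List.lookup, frLookup, hc]
    cases h : a == k <;> simp [h, ih]

-- reference: the forward root-ward path starting at a (a first), within fuel f
def pathF : Nat → String → List (String × String) → List String
  | 0, a, _ => [a]
  | f + 1, a, dic =>
    match frLookup dic a with
    | none => [a]
    | some p => if a == p then [a] else a :: pathF f p dic

theorem frA_loop_eq (f : Nat) : ∀ (a : String) (dic : List (String × String)) (acc : List String),
    chainOk f a dic = true →
    frA_loop (f + 1) a dic acc = (acc ++ pathF f a dic).reverse := by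
  induction f with
  | zero =>
    intro a dic acc h
    simp only [chainOk, lookup_eq_frLookup] at h
    cases hl : frLookup dic a with
    | none => rw [hl] at h; simp at h
    | some p =>
      rw [hl] at h
      simp [frA_loop, pathF, hl, h]
  | succ f ih =>
    intro a dic acc h
    rw [chainOk, lookup_eq_frLookup] at h
    cases hl : frLookup dic a with
    | none => rw [hl] at h; simp at h
    | some p =>
      rw [hl] at h
      by_cases hap : (a == p) = true
      · conv_lhs => rw [frA_loop]
        conv_rhs => rw [pathF]
        rw [hl]
        simp [hap]
      · have h' : chainOk f p dic = true := by simpa [hap] using h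
        conv_lhs => rw [frA_loop]
        conv_rhs => rw [pathF]
        rw [hl]
        simp only [hap, Bool.false_eq_true, if_false]
        rw [ih p dic (acc ++ [a]) h']
        simp

theorem frB_depth_eq (f : Nat) : ∀ (a : String) (dic : List (String × String)) (d : Nat),
    chainOk f a dic = true →
    frB_depth (f + 1) a dic d + 1 = d + (pathF f a dic).length := by
  induction f with
  | zero =>
    intro a dic d h
    simp only [chainOk, lookup_eq_frLookup] at h
    cases hl : frLookup dic a with
    | none => rw [hl] at h; simp at h
    | some p =>
      rw [hl] at h
      simp [frB_depth, pathF, hl, h]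
  | succ f ih =>
    intro a dic d h
    rw [chainOk, lookup_eq_frLookup] at h
    cases hl : frLookup dic a with
    | none => rw [hl] at h; simp at h
    | some p =>
      rw [hl] at h
      by_cases hap : (a == p) = true
      · conv_lhs => rw [frB_depth]
        conv_rhs => rw [pathF]
        rw [hl]
        simp [hap]
      · have h' : chainOk f p dic = true := by simpa [hap] using h
        conv_lhs => rw [frB_depth]
        conv_rhs => rw [pathF]
        rw [hl]
        simp only [hap, Bool.false_eq_true, if_false]
        have := ih p dic (d + 1) h'
        simp only [List.length_cons]
        omega

theorem frB_fill_eq (f : Nat) : ∀ (a : String) (dic : List (String × String)) (out : List String),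
    chainOk f a dic = true →
    frB_fill (pathF f a dic).length a dic out = (pathF f a dic).reverse ++ out := by
  induction f with
  | zero =>
    intro a dic out h
    simp only [chainOk, lookup_eq_frLookup] at h
    cases hl : frLookup dic a with
    | none => rw [hl] at h; simp at h
    | some p =>
      rw [hl] at h
      simp [frB_fill, pathF, hl]
  | succ f ih =>
    intro a dic out h
    rw [chainOk, lookup_eq_frLookup] at h
    cases hl : frLookup dic a with
    | none => rw [hl] at h; simp at h
    | some p =>
      rw [hl] at h
      by_cases hap : (a == p) = true
      · conv_lhs => rw [pathF]
        conv_rhs => rw [pathF]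
        rw [hl]
        simp [hap, frB_fill, hl]
      · have h' : chainOk f p dic = true := by simpa [hap] using h
        conv_lhs => rw [pathF]
        conv_rhs => rw [pathF]
        rw [hl]
        simp only [hap, Bool.false_eq_true, if_false, List.length_cons]
        rw [frB_fill.eq_2, hl]
        simp [ih p dic (a :: out) h']

-- ===== VERDICT (by name: the statement is the Claim_ definition above) =====
theorem final_relation_spec : Claim_equal_final_relation := by
  intro a dic _ hpre
  unfold Spec_final_relation final_relation final_relation_alt
  have hA := frA_loop_eq dic.length a dic [] hpre
  have hD := frB_depth_eq dic.length a dic 1 hpre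
  have hdep : frB_depth (dic.length + 1) a dic 1 = (pathF dic.length a dic).length := by omega
  rw [hA, hdep, frB_fill_eq dic.length a dic [] hpre]
  simp
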